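-- pv_equiv track=rewrite | github.com/nookcoder/Algorithm | python/simpulation/스위치_켜고_끄기.py | switch_changed_by_woman
-- ===== SOURCE A (Python) =====
-- def change_switch(switch_state):
--     if switch_state == 1:
--         return 0
--     else:
--         return 1
--
-- def switch_changed_by_woman(card_number, switch_count, switches):
--     start_index = card_number - 1
--     switches[start_index] = change_switch(switches[start_index])
--     before = start_index - 1
--     after = start_index + 1
--
--     if before < 0 or after >= switch_count:
--         return switches
--
--     while before >= 0 and after < switch_count:
--         if switches[before] == switches[after]:
--             switches[before] = switches[after] = change_switch(switches[before])
--             before -= 1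
--             after += 1
--
--         else:
--             before = -1
--             after = switch_count
--
--     return switches
-- ===== SOURCE B (Python) =====
-- def change_switch(switch_state):
--     if switch_state == 1:
--         return 0
--     else:
--         return 1
--
-- def switch_changed_by_woman(card_number, switch_count, switches):
--     start_index = card_number - 1
--     # Pass 1: measure the symmetric matching radius around start_index (no mutation).
--     radius = 0
--     while (start_index - (radius + 1) >= 0
--            and start_index + (radius + 1) < switch_count
--            and switches[start_index - (radius + 1)] == switches[start_index + (radius + 1)]):
--         radius += 1
--     # Pass 2: toggle the centre and the matched symmetric neighbors.
--     switches[start_index] = change_switch(switches[start_index])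
--     for offset in range(1, radius + 1):
--         switches[start_index - offset] = change_switch(switches[start_index - offset])
--         switches[start_index + offset] = change_switch(switches[start_index + offset])
--     return switches
-- ===== Notes on version B (the rewrite author's own statement) =====
-- stated objective: alternative
-- what changed: A expands outward in one while-loop that toggles pairs as it compares them (using -1/switch_count sentinels to break); B first scans the unmutated list to compute the symmetric match radius, then toggles the centre and the 2*radius neighbors in a separate range loop, dropping A's redundant early-return guard.
import Mathlib
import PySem

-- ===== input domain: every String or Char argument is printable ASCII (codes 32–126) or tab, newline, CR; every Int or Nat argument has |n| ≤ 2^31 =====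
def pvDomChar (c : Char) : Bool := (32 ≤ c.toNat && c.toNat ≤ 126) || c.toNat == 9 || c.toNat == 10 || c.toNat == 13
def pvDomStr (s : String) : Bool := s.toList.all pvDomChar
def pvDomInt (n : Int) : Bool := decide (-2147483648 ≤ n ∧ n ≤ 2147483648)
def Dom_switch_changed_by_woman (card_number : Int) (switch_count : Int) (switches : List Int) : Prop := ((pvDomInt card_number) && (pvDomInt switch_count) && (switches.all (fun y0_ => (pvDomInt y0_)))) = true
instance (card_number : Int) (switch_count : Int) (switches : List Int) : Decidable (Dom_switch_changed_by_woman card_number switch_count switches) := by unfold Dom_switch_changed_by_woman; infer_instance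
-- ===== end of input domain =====

-- B replaces A's single expand-and-toggle-while-you-compare loop by two passes: first a
-- mutation-free scan computing the symmetric match radius, then a toggle pass over that radius.
-- Both Pythons mutate `switches` in place and return it; the equivalence proved here is about the
-- returned value (on inputs admitted by Pre_ the mutation is the same too).

-- ===== PORT A =====
def change_switch (switch_state : Int) : Int :=
  if switch_state = 1 then 0 else 1

-- A's while loop; `switches[...]` accesses use pyGet?/pySetD; a `none` (Python IndexError,
-- excluded by Pre_) returns the current list.
def aLoop (switch_count : Int) (switches : List Int) (before after : Int) : List Int :=
  if 0 ≤ before ∧ after < switch_count then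
    match PySem.List.pyGet? switches before, PySem.List.pyGet? switches after with
    | some vb, some va =>
      if vb = va then
        aLoop switch_count
          (PySem.List.pySetD (PySem.List.pySetD switches before (change_switch vb)) after (change_switch vb))
          (before - 1) (after + 1)
      else
        aLoop switch_count switches (-1) switch_count
    | _, _ => switches
  else switches
termination_by (before + 1).toNat
decreasing_by all_goals omega

def switch_changed_by_woman (card_number : Int) (switch_count : Int) (switches : List Int) : List Int :=
  let start_index := card_number - 1
  match PySem.List.pyGet? switches start_index with
  | none => switches   -- Python raises IndexError here (excluded by Pre_)
  | some v =>
    let switches1 := PySem.List.pySetD switches start_index (change_switch v)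
    let before := start_index - 1
    let after := start_index + 1
    if before < 0 ∨ after ≥ switch_count then switches1
    else aLoop switch_count switches1 before after

-- ===== PORT B =====
-- `xs[i] = change_switch(xs[i])`; a `none` index (Python IndexError, excluded by Pre_) is a no-op.
def pyToggle (switches : List Int) (i : Int) : List Int :=
  match PySem.List.pyGet? switches i with
  | some v => PySem.List.pySetD switches i (change_switch v)
  | none => switches

-- B's first pass: the symmetric matching radius around start_index (reads only, no mutation).
def bRadius (switch_count : Int) (switches : List Int) (start_index radius : Int) : Int :=
  if 0 ≤ start_index - (radius + 1) ∧ start_index + (radius + 1) < switch_count then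
    match PySem.List.pyGet? switches (start_index - (radius + 1)),
          PySem.List.pyGet? switches (start_index + (radius + 1)) with
    | some x, some y => if x = y then bRadius switch_count switches start_index (radius + 1) else radius
    | _, _ => radius
  else radius
termination_by (start_index - radius).toNat
decreasing_by all_goals omega

def switch_changed_by_woman_alt (card_number : Int) (switch_count : Int) (switches : List Int) : List Int :=
  let start_index := card_number - 1
  let radius := bRadius switch_count switches start_index 0
  let switches1 := pyToggle switches start_index
  (PySem.List.pyRange 1 (radius + 1) 1).foldl
    (fun acc offset => pyToggle (pyToggle acc (start_index - offset)) (start_index + offset)) switches1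

-- ===== PRECONDITION & SPEC =====
-- Pre_ = exactly the inputs on which Python A returns (no IndexError): the start index is a valid
-- Python index, and NOT (the list is a palindrome around a nonnegative start index sitting in the
-- right half while switch_count exceeds the length — there the outward scan runs past the list's end).
def Pre_switch_changed_by_woman (card_number : Int) (switch_count : Int) (switches : List Int) : Prop :=
  PySem.Raise.InRange switches.length (card_number - 1) ∧
  ¬ (0 ≤ card_number - 1 ∧ (switches.length : Int) < switch_count ∧
     (switches.length : Int) ≤ 2 * (card_number - 1) ∧
     ∀ o ∈ PySem.List.pyRange 1 ((switches.length : Int) - (card_number - 1)) 1,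
       PySem.List.pyGet? switches (card_number - 1 - o) = PySem.List.pyGet? switches (card_number - 1 + o))
instance (card_number : Int) (switch_count : Int) (switches : List Int) : Decidable (Pre_switch_changed_by_woman card_number switch_count switches) := by
  unfold Pre_switch_changed_by_woman; infer_instance

def pvWitness_switch_changed_by_woman : Int × Int × List Int := (2, 3, [1, 0, 1])

def Spec_switch_changed_by_woman (card_number : Int) (switch_count : Int) (switches : List Int) (out : List Int) : Prop := out = switch_changed_by_woman_alt card_number switch_count switches
instance (card_number : Int) (switch_count : Int) (switches : List Int) (out : List Int) : Decidable (Spec_switch_changed_by_woman card_number switch_count switches out) := by unfold Spec_switch_changed_by_woman; infer_instance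

-- ===== CLAIM (what is proved, stated in full; the proofs are below) =====
def Claim_equal_switch_changed_by_woman : Prop := ∀ (card_number : Int) (switch_count : Int) (switches : List Int), Dom_switch_changed_by_woman card_number switch_count switches → Pre_switch_changed_by_woman card_number switch_count switches → Spec_switch_changed_by_woman card_number switch_count switches (switch_changed_by_woman card_number switch_count switches)

-- ===== LEMMAS AND PROOFS =====

theorem pyGet?_pySetD_ne (sw : List Int) (i j v : Int) (hi : 0 ≤ i) (hj : 0 ≤ j) (hne : i ≠ j) :
    PySem.List.pyGet? (PySem.List.pySetD sw i v) j = PySem.List.pyGet? sw j := by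
  rw [PySem.List.pySetD_of_nonneg _ _ hi, PySem.List.pyGet?_of_nonneg _ hj,
    PySem.List.pyGet?_of_nonneg _ hj]
  exact List.getElem?_set_ne (by omega)

-- the number of further matches from offset o outward (on an unchanging list)
def nmatch (sc : Int) (sw : List Int) (s o : Int) : Nat :=
  if 0 ≤ s - o ∧ s + o < sc then
    match PySem.List.pyGet? sw (s - o), PySem.List.pyGet? sw (s + o) with
    | some x, some y => if x = y then nmatch sc sw s (o + 1) + 1 else 0
    | _, _ => 0
  else 0
termination_by (s - o + 1).toNat
decreasing_by all_goals omega

-- the toggle pass, offset by offset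
def applyFrom (sw : List Int) (s o : Int) : Nat → List Int
  | 0 => sw
  | Nat.succ m => applyFrom (pyToggle (pyToggle sw (s - o)) (s + o)) s (o + 1) m

theorem nmatch_set (sc : Int) (sw : List Int) (s i v : Int) (hi : 0 ≤ i) :
    ∀ o : Int, s - o < i → i < s + o →
      nmatch sc (PySem.List.pySetD sw i v) s o = nmatch sc sw s o := by
  intro o
  induction o using nmatch.induct (sc := sc) (sw := sw) (s := s) with
  | case1 o hg y hpa hpb ih =>
    intro hlo hhi
    conv_lhs => rw [nmatch.eq_def]
    conv_rhs => rw [nmatch.eq_def]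
    rw [if_pos hg, if_pos hg,
      pyGet?_pySetD_ne sw i (s - o) v hi (by omega) (by omega),
      pyGet?_pySetD_ne sw i (s + o) v hi (by omega) (by omega), hpa, hpb]
    rw [ih (by omega) (by omega)]
  | case2 o hg x y hpa hpb hne =>
    intro hlo hhi
    conv_lhs => rw [nmatch.eq_def]
    conv_rhs => rw [nmatch.eq_def]
    rw [if_pos hg, if_pos hg,
      pyGet?_pySetD_ne sw i (s - o) v hi (by omega) (by omega),
      pyGet?_pySetD_ne sw i (s + o) v hi (by omega) (by omega), hpa, hpb]
    simp [hne]
  | case3 o hg hnone =>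
    intro hlo hhi
    conv_lhs => rw [nmatch.eq_def]
    conv_rhs => rw [nmatch.eq_def]
    rw [if_pos hg, if_pos hg,
      pyGet?_pySetD_ne sw i (s - o) v hi (by omega) (by omega),
      pyGet?_pySetD_ne sw i (s + o) v hi (by omega) (by omega)]
    rcases h1 : PySem.List.pyGet? sw (s - o) with _ | x <;>
      rcases h2 : PySem.List.pyGet? sw (s + o) with _ | y <;> simp_all
  | case4 o hg =>
    intro _ _
    conv_lhs => rw [nmatch.eq_def]
    conv_rhs => rw [nmatch.eq_def]
    rw [if_neg hg, if_neg hg]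

theorem bRadius_eq (sc : Int) (sw : List Int) (s : Int) :
    ∀ r : Int, bRadius sc sw s r = r + (nmatch sc sw s (r + 1) : Int) := by
  intro r
  induction r using bRadius.induct (switch_count := sc) (switches := sw) (start_index := s) with
  | case1 r hg y hpa hpb ih =>
    conv_lhs => rw [bRadius.eq_def]
    rw [if_pos hg, hpa, hpb]
    conv_rhs => rw [nmatch.eq_def]
    rw [if_pos hg, hpa, hpb]
    simp only [ih]
    push_cast
    ring
  | case2 r hg x y hpa hpb hne =>
    conv_lhs => rw [bRadius.eq_def]
    rw [if_pos hg, hpa, hpb]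
    conv_rhs => rw [nmatch.eq_def]
    rw [if_pos hg, hpa, hpb]
    simp [hne]
  | case3 r hg hnone =>
    conv_lhs => rw [bRadius.eq_def]
    rw [if_pos hg]
    conv_rhs => rw [nmatch.eq_def]
    rw [if_pos hg]
    rcases h1 : PySem.List.pyGet? sw (s - (r + 1)) with _ | x <;>
      rcases h2 : PySem.List.pyGet? sw (s + (r + 1)) with _ | y <;> simp_all
  | case4 r hg =>
    conv_lhs => rw [bRadius.eq_def]
    rw [if_neg hg]
    conv_rhs => rw [nmatch.eq_def]
    rw [if_neg hg]
    simp

theorem aLoop_eq (sc : Int) (s : Int) : ∀ (n : Nat) (sw : List Int) (o : Int), 1 ≤ o →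
    nmatch sc sw s o = n → aLoop sc sw (s - o) (s + o) = applyFrom sw s o n := by
  intro n
  induction n with
  | zero =>
    intro sw o ho hm
    rw [nmatch.eq_def] at hm
    rw [aLoop.eq_def]
    split_ifs with hg
    · rw [if_pos hg] at hm
      rcases h1 : PySem.List.pyGet? sw (s - o) with _ | x
      · simp [applyFrom]
      rcases h2 : PySem.List.pyGet? sw (s + o) with _ | y
      · simp [applyFrom]
      rw [h1, h2] at hm
      change (if x = y then nmatch sc sw s (o + 1) + 1 else 0) = 0 at hm
      change (if x = y then
          aLoop sc (PySem.List.pySetD (PySem.List.pySetD sw (s - o) (change_switch x)) (s + o)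
            (change_switch x)) (s - o - 1) (s + o + 1)
        else aLoop sc sw (-1) sc) = applyFrom sw s o 0
      by_cases hxy : x = y
      · simp [hxy] at hm
      · rw [if_neg hxy, aLoop.eq_def, if_neg (by omega)]
        rfl
    · simp [applyFrom]
  | succ m ih =>
    intro sw o ho hm
    rw [nmatch.eq_def] at hm
    rw [aLoop.eq_def]
    split_ifs with hg
    · rw [if_pos hg] at hm
      rcases h1 : PySem.List.pyGet? sw (s - o) with _ | x
      · rw [h1] at hm; simp at hm
      rcases h2 : PySem.List.pyGet? sw (s + o) with _ | y
      · rw [h1, h2] at hm; simp at hm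
      rw [h1, h2] at hm
      change (if x = y then nmatch sc sw s (o + 1) + 1 else 0) = m + 1 at hm
      by_cases hxy : x = y
      · subst hxy
        rw [if_pos rfl] at hm
        change (if x = x then
            aLoop sc (PySem.List.pySetD (PySem.List.pySetD sw (s - o) (change_switch x)) (s + o)
              (change_switch x)) (s - o - 1) (s + o + 1)
          else aLoop sc sw (-1) sc) = applyFrom sw s o (m + 1)
        rw [if_pos rfl]
        simp only [applyFrom, pyToggle, h1,
          pyGet?_pySetD_ne sw (s - o) (s + o) (change_switch x) (by omega) (by omega) (by omega), h2]
        have harg1 : s - o - 1 = s - (o + 1) := by ring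
        have harg2 : s + o + 1 = s + (o + 1) := by ring
        rw [harg1, harg2]
        refine ih _ (o + 1) (by omega) ?_
        rw [nmatch_set sc (PySem.List.pySetD sw (s - o) (change_switch x)) s (s + o)
            (change_switch x) (by omega) (o + 1) (by omega) (by omega),
          nmatch_set sc sw s (s - o) (change_switch x) (by omega) (o + 1) (by omega) (by omega)]
        omega
      · rw [if_neg hxy] at hm
        omega
    · rw [if_neg (by omega : ¬ (0 ≤ s - o ∧ s + o < sc))] at hm
      omega

theorem fold_eq (s : Int) : ∀ (n : Nat) (sw : List Int) (o : Int),
    (PySem.List.pyRange o (o + (n : Int)) 1).foldl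
      (fun acc offset => pyToggle (pyToggle acc (s - offset)) (s + offset)) sw = applyFrom sw s o n := by
  intro n
  induction n with
  | zero =>
    intro sw o
    simp [PySem.List.pyRange, applyFrom]
  | succ m ih =>
    intro sw o
    push_cast
    rw [PySem.List.pyRange_one_cons (by omega : o < o + ((m : Int) + 1))]
    have harg : o + ((m : Int) + 1) = (o + 1) + (m : Int) := by ring
    rw [harg]
    simpa [applyFrom] using ih (pyToggle (pyToggle sw (s - o)) (s + o)) (o + 1)

theorem ports_eq (card_number switch_count : Int) (switches : List Int) :
    switch_changed_by_woman card_number switch_count switches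
      = switch_changed_by_woman_alt card_number switch_count switches := by
  simp only [switch_changed_by_woman, switch_changed_by_woman_alt]
  rcases hget : PySem.List.pyGet? switches (card_number - 1) with _ | v
  · -- start index out of range: A returns the list unchanged; B's scan stops at once
    have hr0 : bRadius switch_count switches (card_number - 1) 0 = 0 := by
      rw [bRadius.eq_def]
      split_ifs with hg
      · have hlen : (switches.length : Int) ≤ card_number - 1 := by
          have hni := (PySem.List.pyGet?_eq_none_iff (xs := switches) (i := card_number - 1)).mp hget
          simp [PySem.Raise.InRange] at hni
          omega
        have h2 : PySem.List.pyGet? switches card_number = none := by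
          rw [PySem.List.pyGet?_eq_none_iff]
          simp [PySem.Raise.InRange]
          omega
        rcases h1 : PySem.List.pyGet? switches (card_number - 1 - (0 + 1)) with _ | x
        · simp
        · simp [h2]
      · rfl
    rw [hr0]
    norm_num [PySem.List.pyRange, pyToggle, hget]
  · have htog : pyToggle switches (card_number - 1)
        = PySem.List.pySetD switches (card_number - 1) (change_switch v) := by
      simp [pyToggle, hget]
    rw [htog]
    by_cases hE : card_number - 1 - 1 < 0 ∨ card_number - 1 + 1 ≥ switch_count
    · -- A's early-return guard; B's scan condition is false, radius = 0
      simp only [if_pos hE]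
      have hr0 : bRadius switch_count switches (card_number - 1) 0 = 0 := by
        rw [bRadius.eq_def, if_neg (by omega)]
      rw [hr0]
      norm_num [PySem.List.pyRange]
    · simp only [if_neg hE]
      have hA : aLoop switch_count (PySem.List.pySetD switches (card_number - 1) (change_switch v))
          (card_number - 1 - 1) (card_number - 1 + 1)
          = applyFrom (PySem.List.pySetD switches (card_number - 1) (change_switch v))
              (card_number - 1) 1 (nmatch switch_count switches (card_number - 1) 1) := by
        exact aLoop_eq switch_count (card_number - 1) _ _ 1 le_rfl
          (nmatch_set switch_count switches (card_number - 1) (card_number - 1)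
            (change_switch v) (by omega) 1 (by omega) (by omega))
      have hB : bRadius switch_count switches (card_number - 1) 0
          = ((nmatch switch_count switches (card_number - 1) 1 : Nat) : Int) := by
        rw [bRadius_eq]
        norm_num
      rw [hA, hB]
      have harg : ((nmatch switch_count switches (card_number - 1) 1 : Nat) : Int) + 1
          = 1 + ((nmatch switch_count switches (card_number - 1) 1 : Nat) : Int) := by ring
      rw [harg, fold_eq]

-- ===== VERDICT (by name: the statement is the Claim_ definition above) =====
theorem switch_changed_by_woman_spec : Claim_equal_switch_changed_by_woman := by
  intro card_number switch_count switches _ _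
  unfold Spec_switch_changed_by_woman
  exact ports_eq card_number switch_count switches
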